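-- pv_equiv track=rewrite | github.com/softmoca/Python_Algorithm_CodingTest | 입문자를 위한 코딩테스트 핵심/2 해시/나의 코드/1. 빈도수(ver 1).py | solution
-- ===== SOURCE A (Python) =====
-- from collections import defaultdict
--
-- def solution(nums):
--     answer = -1
--     MM=0
--     dic=defaultdict()
--     for x in nums:
--         if x in dic:
--             dic[x]=2
--         else:
--             dic[x]=1
--     for key in dic:
--         if dic[key]==1:
--             if MM< key:
--                 MM=key
--
--
--
--     return -1 if MM==0 else MM
-- ===== SOURCE B (Python) =====
-- def solution(nums):
--     s = sorted(nums)
--     best = -1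
--     n = len(s)
--     i = 0
--     while i < n:
--         j = i + 1
--         while j < n and s[j] == s[i]:
--             j += 1
--         if j == i + 1 and s[i] > 0:
--             best = s[i]
--         i = j
--     return best
-- ===== Notes on version B (the rewrite author's own statement) =====
-- stated objective: alternative
-- what changed: Replaced A's hash-frequency map plus running-max key loop with sorting the list and a single run-length scan of the sorted copy that records each positive value occurring exactly once (the last recorded, being largest in sorted order, is the answer; -1 if none).
import Mathlib
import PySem

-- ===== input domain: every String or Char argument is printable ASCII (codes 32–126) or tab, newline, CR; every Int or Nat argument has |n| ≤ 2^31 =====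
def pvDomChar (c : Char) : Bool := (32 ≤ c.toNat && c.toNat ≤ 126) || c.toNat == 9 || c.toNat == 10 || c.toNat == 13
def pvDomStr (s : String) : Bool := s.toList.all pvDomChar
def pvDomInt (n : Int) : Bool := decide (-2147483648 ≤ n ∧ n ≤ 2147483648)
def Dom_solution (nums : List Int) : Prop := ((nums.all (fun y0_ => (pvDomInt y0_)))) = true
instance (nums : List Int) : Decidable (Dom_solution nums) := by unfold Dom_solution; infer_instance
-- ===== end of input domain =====

-- B replaces A's hash-frequency map with sort-then-scan: sort nums, walk the sorted list one
-- run of equal values at a time, and record each positive value whose run has length 1 (the last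
-- one recorded is the largest); -1 if none. A different algorithm, not claimed faster.

-- ===== PORT A =====
-- the frequency dict: dic[x] = 2 if x was seen before else 1
def solutionDic (nums : List Int) : PySem.Dict Int Int :=
  nums.foldl (fun d x => if d.contains x then d.insert x 2 else d.insert x 1) PySem.Dict.empty

def solution (nums : List Int) : Int :=
  let dic := solutionDic nums
  -- for key in dic: if dic[key]==1: if MM<key: MM=key   (dic[key] is present for key ∈ keys)
  let MM := dic.keys.foldl (fun MM key => if dic.getD key 0 = 1 then (if MM < key then key else MM) else MM) 0
  if MM = 0 then -1 else MM

-- ===== PORT B =====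
-- the outer while loop of Source B: each step consumes one run of equal values of the
-- sorted list (the inner 'while j < n and s[j] == s[i]' = takeWhile/dropWhile) and
-- records the value when the run has length 1 ('j == i + 1') and is positive
def runScan (s : List Int) (best : Int) : Int :=
  match s with
  | [] => best
  | x :: xs =>
    runScan (xs.dropWhile (fun y => y == x))
      (if xs.takeWhile (fun y => y == x) = [] ∧ 0 < x then x else best)
termination_by s.length
decreasing_by
  simp only [List.length_cons]
  exact Nat.lt_succ_of_le (List.length_dropWhile_le _ _)

def solution_alt (nums : List Int) : Int :=
  runScan (PySem.List.sorted nums (fun y => y) false) (-1)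

-- ===== PRECONDITION & SPEC =====
def Spec_solution (nums : List Int) (out : Int) : Prop := out = solution_alt nums
instance (nums : List Int) (out : Int) : Decidable (Spec_solution nums out) := by unfold Spec_solution; infer_instance

-- ===== CLAIM (what is proved, stated in full; the proofs are below) =====
def Claim_equal_solution : Prop := ∀ (nums : List Int), Dom_solution nums → Spec_solution nums (solution nums)

-- ===== LEMMAS AND PROOFS =====

-- get? of A's frequency dict, as a function of occurrence counts
theorem solutionDic_get (l : List Int) (d : PySem.Dict Int Int) (v : Int) :
    (l.foldl (fun d x => if d.contains x then d.insert x 2 else d.insert x 1) d).get? v =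
      if l.count v = 0 then d.get? v
      else if d.contains v || decide (2 ≤ l.count v) then some 2 else some 1 := by
  induction l generalizing d with
  | nil => simp
  | cons x l ih =>
    simp only [List.foldl_cons, ih, List.count_cons]
    by_cases hvx : v = x
    · subst hvx
      have hg : (if d.contains v then d.insert v 2 else d.insert v 1).get? v
          = some (if d.contains v then 2 else 1) := by
        split <;> simp [PySem.Dict.get?_insert_self]
      have hc : (if d.contains v then d.insert v 2 else d.insert v 1).contains v = true := by
        split <;> simp [PySem.Dict.contains_insert_self]
      by_cases h0 : l.count v = 0
      · simp only [h0, hg]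
        simp
        rcases Bool.eq_false_or_eq_true (d.contains v) with h | h <;> simp [h]
      · have h2 : 2 ≤ l.count v + 1 := by omega
        simp [h0, hc, h2]
    · have hne : v ≠ x := hvx
      have hxv : ¬ x = v := fun h => hne h.symm
      have hc : (if d.contains x then d.insert x 2 else d.insert x 1).contains v = d.contains v := by
        split <;> simp [PySem.Dict.contains_insert, hne]
      have hg : (if d.contains x then d.insert x 2 else d.insert x 1).get? v = d.get? v := by
        split <;> rw [PySem.Dict.get?_insert_of_ne _ _ hne]
      simp [hxv, hc, hg]

theorem solutionDic_get_empty (nums : List Int) (v : Int) :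
    (solutionDic nums).get? v =
      if nums.count v = 0 then none
      else if 2 ≤ nums.count v then some 2 else some 1 := by
  rw [solutionDic, solutionDic_get]
  simp [PySem.Dict.get?_empty, PySem.Dict.contains_empty]

-- the inner 'if MM<key then key else MM' is a max
theorem foldl_if_lt_eq_filter_max (p : Int → Prop) [DecidablePred p] (ks : List Int) (a : Int) :
    ks.foldl (fun MM k => if p k then (if MM < k then k else MM) else MM) a
      = (ks.filter (fun k => decide (p k))).foldl max a := by
  induction ks generalizing a with
  | nil => rfl
  | cons k ks ih =>
    simp only [List.foldl_cons, List.filter_cons]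
    by_cases hp : p k
    · simp only [hp, decide_true, if_pos, List.foldl_cons, ih]
      congr 1
      rcases lt_or_ge a k with h | h
      · simp [h, max_eq_right (le_of_lt h)]
      · simp [not_lt.mpr h, max_eq_left h]
    · simp [hp, ih]

-- non-positive elements never move a non-negative running max
theorem foldl_max_filter_pos (L : List Int) (a : Int) (ha : 0 ≤ a) :
    L.foldl max a = (L.filter (fun x => decide (0 < x))).foldl max a := by
  induction L generalizing a with
  | nil => rfl
  | cons x L ih =>
    simp only [List.foldl_cons, List.filter_cons]
    by_cases hx : 0 < x
    · simp only [hx, decide_true, if_pos, List.foldl_cons]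
      exact ih (max a x) (le_trans ha (le_max_left a x))
    · have : max a x = a := max_eq_left (by omega)
      simp [hx, this, ih a ha]

theorem le_foldl_max' (L : List Int) (a : Int) : a ≤ L.foldl max a := by
  induction L generalizing a with
  | nil => exact le_refl a
  | cons x L ih => exact le_trans (le_max_left a x) (ih (max a x))

theorem mem_le_foldl_max (L : List Int) (a : Int) : ∀ x ∈ L, x ≤ L.foldl max a := by
  induction L generalizing a with
  | nil => intro x hx; cases hx
  | cons y L ih =>
    intro x hx
    rcases List.mem_cons.mp hx with h | h
    · subst h; exact le_trans (le_max_right a x) (le_foldl_max' L _)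
    · exact ih (max a y) x h

theorem foldl_max_mem (L : List Int) (a : Int) : L.foldl max a = a ∨ L.foldl max a ∈ L := by
  induction L generalizing a with
  | nil => exact Or.inl rfl
  | cons x L ih =>
    rcases ih (max a x) with h | h
    · rcases max_choice a x with hm | hm
      · rw [List.foldl_cons] at *; rw [h, hm]; exact Or.inl rfl
      · right; rw [List.foldl_cons, h, hm]; exact List.mem_cons_self
    · right; exact List.mem_cons_of_mem x h

-- a running max depends only on the membership set of the list
theorem foldl_max_congr_mem (L₁ L₂ : List Int) (a : Int) (h : ∀ x, x ∈ L₁ ↔ x ∈ L₂) :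
    L₁.foldl max a = L₂.foldl max a := by
  apply le_antisymm
  · rcases foldl_max_mem L₁ a with h1 | h1
    · rw [h1]; exact le_foldl_max' L₂ a
    · exact mem_le_foldl_max L₂ a _ ((h _).mp h1)
  · rcases foldl_max_mem L₂ a with h2 | h2
    · rw [h2]; exact le_foldl_max' L₁ a
    · exact mem_le_foldl_max L₁ a _ ((h _).mpr h2)

-- membership in A's selected keys = membership in B's candidate list
theorem keys_filter_mem (nums : List Int) (x : Int) :
    (x ∈ ((solutionDic nums).keys.filter
        (fun k => decide ((solutionDic nums).getD k 0 = 1))).filter (fun x => decide (0 < x)))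
    ↔ x ∈ nums.filter (fun x => decide (0 < x) && (nums.count x == 1)) := by
  simp only [List.mem_filter, Bool.and_eq_true, decide_eq_true_eq, beq_iff_eq]
  constructor
  · rintro ⟨⟨hk, hv⟩, hpos⟩
    rw [PySem.Dict.getD_eq_get?_getD, solutionDic_get_empty] at hv
    by_cases h0 : nums.count x = 0
    · simp [h0] at hv
    · by_cases h2 : 2 ≤ nums.count x
      · simp [h0, h2] at hv
      · exact ⟨List.count_pos_iff.mp (by omega), hpos, by omega⟩
  · rintro ⟨hmem, hpos, hc1⟩
    have hget : (solutionDic nums).get? x = some 1 := by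
      rw [solutionDic_get_empty]; simp [hc1]
    refine ⟨⟨?_, ?_⟩, hpos⟩
    · rw [← PySem.Dict.contains_iff_mem_keys, PySem.Dict.contains_eq_isSome_get?, hget]; rfl
    · rw [PySem.Dict.getD_eq_get?_getD, hget]; rfl

-- one run-consuming step of Source B's scan: the facts about a sorted list x :: xs
theorem runScan_eq (s : List Int) (b : Int) (hs : s.Pairwise (· ≤ ·)) :
    runScan s b
      = (s.filter (fun y => decide (0 < y) && (s.count y == 1))).foldl (fun _ y => y) b := by
  induction s, b using runScan.induct with
  | case1 b => simp [runScan]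
  | case2 b x xs ih =>
    simp only [dite_eq_ite] at ih
    obtain ⟨hx, hxs⟩ := List.pairwise_cons.mp hs
    have hsplit : xs.takeWhile (fun y => y == x) ++ xs.dropWhile (fun y => y == x) = xs :=
      List.takeWhile_append_dropWhile
    have hrestpair : (xs.dropWhile (fun y => y == x)).Pairwise (· ≤ ·) :=
      List.Pairwise.sublist (List.dropWhile_sublist _) hxs
    have hxlt : ∀ y ∈ xs.dropWhile (fun y => y == x), x < y := by
      cases hr : xs.dropWhile (fun y => y == x) with
      | nil => simp
      | cons h t =>
        have hne : xs.dropWhile (fun y => y == x) ≠ [] := by rw [hr]; simp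
        have hh := List.head_dropWhile_not (fun y => y == x) hne
        have hhead : (xs.dropWhile (fun y => y == x)).head hne = h := by simp [hr]
        rw [hhead] at hh
        have hhx : h ≠ x := by simpa using hh
        have hhmem : h ∈ xs := (List.dropWhile_sublist _).mem (by rw [hr]; exact List.mem_cons_self)
        have hxh : x < h := lt_of_le_of_ne (hx h hhmem) (Ne.symm hhx)
        intro y hy
        rcases List.mem_cons.mp hy with h1 | h1
        · subst h1; exact hxh
        · have hrp : (h :: t).Pairwise (· ≤ ·) := by rw [← hr]; exact hrestpair
          exact lt_of_lt_of_le hxh ((List.pairwise_cons.mp hrp).1 y h1)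
    have hxnotin : x ∉ xs.dropWhile (fun y => y == x) := fun hmem => lt_irrefl x (hxlt x hmem)
    have hrunx : ∀ y ∈ xs.takeWhile (fun y => y == x), y = x := fun y hy => by
      simpa using List.mem_takeWhile_imp hy
    have hccx := congrArg (List.count x) hsplit
    rw [List.count_append] at hccx
    have hcountx : (x :: xs).count x = (xs.takeWhile (fun y => y == x)).length + 1 := by
      rw [List.count_cons_self, ← hccx,
          List.count_eq_length.mpr (fun y hy => (hrunx y hy).symm),
          List.count_eq_zero.mpr hxnotin]
    have hcounty : ∀ y ∈ xs.dropWhile (fun y => y == x),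
        (x :: xs).count y = (xs.dropWhile (fun y => y == x)).count y := by
      intro y hy
      have hyx : ¬ (y = x) := ne_of_gt (hxlt y hy)
      have hcc := congrArg (List.count y) hsplit
      rw [List.count_append] at hcc
      have h1 : (xs.takeWhile (fun z => z == x)).count y = 0 :=
        List.count_eq_zero.mpr (fun h => hyx (hrunx y h))
      have hxy : ¬ (x = y) := fun h => hyx h.symm
      calc (x :: xs).count y = xs.count y := by simp [hxy]
        _ = (xs.takeWhile (fun z => z == x)).count y
              + (xs.dropWhile (fun z => z == x)).count y := hcc.symm
        _ = (xs.dropWhile (fun z => z == x)).count y := by rw [h1, Nat.zero_add]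
    -- the filter of the whole list splits into the head-run part and the rest part
    have hrestfilter :
        (xs.dropWhile (fun y => y == x)).filter (fun y => decide (0 < y) && ((x :: xs).count y == 1))
          = (xs.dropWhile (fun y => y == x)).filter
              (fun y => decide (0 < y) && ((xs.dropWhile (fun y => y == x)).count y == 1)) :=
      List.filter_congr (fun y hy => by rw [hcounty y hy])
    have hrunfilter :
        (xs.takeWhile (fun y => y == x)).filter (fun y => decide (0 < y) && ((x :: xs).count y == 1))
          = [] := by
      rw [List.filter_eq_nil_iff]
      intro y hy
      have hyx : y = x := hrunx y hy
      subst hyx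
      have hlen : 1 ≤ (xs.takeWhile (fun z => z == y)).length :=
        List.length_pos_iff.mpr (List.ne_nil_of_mem hy)
      simp only [hcountx, Bool.and_eq_true, beq_iff_eq, decide_eq_true_eq, not_and]
      omega
    have hfilter :
        (x :: xs).filter (fun y => decide (0 < y) && ((x :: xs).count y == 1))
          = (if xs.takeWhile (fun y => y == x) = [] ∧ 0 < x then [x] else [])
            ++ (xs.dropWhile (fun y => y == x)).filter
                (fun y => decide (0 < y) && ((xs.dropWhile (fun y => y == x)).count y == 1)) := by
      have hfs := congrArg (List.filter (fun y => decide (0 < y) && ((x :: xs).count y == 1))) hsplit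
      rw [List.filter_append] at hfs
      rw [List.filter_cons, ← hfs, hrunfilter, hrestfilter, List.nil_append]
      by_cases hcond : xs.takeWhile (fun y => y == x) = [] ∧ 0 < x
      · have hpx : (decide (0 < x) && ((x :: xs).count x == 1)) = true := by
          rw [hcountx, hcond.1]
          simp [hcond.2]
        rw [if_pos hpx, if_pos hcond, List.singleton_append]
      · have hpx : (decide (0 < x) && ((x :: xs).count x == 1)) = false := by
          rw [hcountx]
          rcases not_and_or.mp hcond with h | h
          · have hlen : 0 < (xs.takeWhile (fun y => y == x)).length := List.length_pos_iff.mpr h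
            have h1 : (((xs.takeWhile (fun y => y == x)).length + 1) == 1) = false := by
              rw [beq_eq_false_iff_ne]
              omega
            rw [h1, Bool.and_false]
          · simp [h]
        have hpx' : ¬ ((decide (0 < x) && ((x :: xs).count x == 1)) = true) := by
          rw [hpx]; simp
        rw [if_neg hpx', if_neg hcond, List.nil_append]
    rw [runScan, ih hrestpair, hfilter]
    by_cases hcond : xs.takeWhile (fun y => y == x) = [] ∧ 0 < x
    · rw [if_pos hcond, if_pos hcond, List.singleton_append, List.foldl_cons]
    · rw [if_neg hcond, if_neg hcond, List.nil_append]

-- the fold 'keep the last element' over a non-empty ≤-sorted list is its running max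
theorem foldl_last_eq_foldl_max (t : List Int) (f b : Int) (h : (f :: t).Pairwise (· ≤ ·)) :
    (f :: t).foldl (fun _ y => y) b = t.foldl max f := by
  induction t generalizing f b with
  | nil => rfl
  | cons y t ih =>
    have hfy : f ≤ y := (List.pairwise_cons.mp h).1 y List.mem_cons_self
    have hpt : (y :: t).Pairwise (· ≤ ·) := (List.pairwise_cons.mp h).2
    calc (f :: y :: t).foldl (fun _ y => y) b
        = (y :: t).foldl (fun _ y => y) f := by simp [List.foldl_cons]
      _ = t.foldl max y := ih y f hpt
      _ = t.foldl max (max f y) := by rw [max_eq_right hfy]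
      _ = (y :: t).foldl max f := by rw [List.foldl_cons]

-- ===== VERDICT (by name: the statement is the Claim_ definition above) =====
theorem solution_spec : Claim_equal_solution := by
  intro nums _
  unfold Spec_solution solution solution_alt
  simp only
  rw [foldl_if_lt_eq_filter_max (fun k => (solutionDic nums).getD k 0 = 1),
      foldl_max_filter_pos _ 0 (le_refl 0),
      foldl_max_congr_mem _ _ 0 (keys_filter_mem nums)]
  have hperm := PySem.List.sorted_perm nums (fun y => y) false
  have hpair : (PySem.List.sorted nums (fun y => y) false).Pairwise (· ≤ ·) := by
    simpa using PySem.List.sorted_pairwise nums (fun y => y)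
  rw [runScan_eq _ _ hpair]
  have hfe : (PySem.List.sorted nums (fun y => y) false).filter
        (fun y => decide (0 < y) && ((PySem.List.sorted nums (fun y => y) false).count y == 1))
      = (PySem.List.sorted nums (fun y => y) false).filter
        (fun y => decide (0 < y) && (nums.count y == 1)) :=
    List.filter_congr (fun y _ => by rw [hperm.count_eq])
  rw [hfe]
  have hmemiff : ∀ z, z ∈ nums.filter (fun y => decide (0 < y) && (nums.count y == 1))
      ↔ z ∈ (PySem.List.sorted nums (fun y => y) false).filter
            (fun y => decide (0 < y) && (nums.count y == 1)) := by
    intro z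
    simp only [List.mem_filter, PySem.List.mem_sorted]
  have hFpair : ((PySem.List.sorted nums (fun y => y) false).filter
      (fun y => decide (0 < y) && (nums.count y == 1))).Pairwise (· ≤ ·) := hpair.filter _
  cases hF : (PySem.List.sorted nums (fun y => y) false).filter
      (fun y => decide (0 < y) && (nums.count y == 1)) with
  | nil =>
    have hcs : nums.filter (fun y => decide (0 < y) && (nums.count y == 1)) = [] := by
      rw [List.eq_nil_iff_forall_not_mem]
      intro z hz
      exact (List.eq_nil_iff_forall_not_mem.mp hF) z ((hmemiff z).mp hz)
    rw [hcs]
    simp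
  | cons f tF =>
    have hfpos : 0 < f := by
      have hfm : f ∈ (PySem.List.sorted nums (fun y => y) false).filter
          (fun y => decide (0 < y) && (nums.count y == 1)) := by
        rw [hF]; exact List.mem_cons_self
      have := List.mem_filter.mp hfm
      simp only [Bool.and_eq_true, decide_eq_true_eq] at this
      exact this.2.1
    rw [hF] at hmemiff hFpair
    rw [foldl_max_congr_mem _ _ 0 hmemiff, foldl_last_eq_foldl_max tF f (-1) hFpair,
        List.foldl_cons, max_eq_right (le_of_lt hfpos)]
    rw [if_neg (by have := le_foldl_max' tF f; omega)]
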